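-- pv_equiv track=rewrite | github.com/alialzein01/social-media-analytics | app/adapters/__init__.py | calculate_total_engagement
-- ===== SOURCE A (Python) =====
-- from typing import List, Dict, Optional, Any
--
-- def calculate_total_engagement(posts: List[Dict]) -> Dict[str, int]:
--     """
--     Calculate total engagement metrics across all posts.
--
--     Args:
--         posts: List of normalized posts
--
--     Returns:
--         Dictionary with engagement totals
--     """
--     total_likes = sum(post.get("likes", 0) for post in posts)
--     total_comments = sum(post.get("comments_count", 0) for post in posts)
--     total_shares = sum(post.get("shares_count", 0) for post in posts)
--
--     return {
--         "total_likes": total_likes,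
--         "total_comments": total_comments,
--         "total_shares": total_shares,
--         "total_posts": len(posts),
--     }
-- ===== SOURCE B (Python) =====
-- def calculate_total_engagement(posts):
--     field = {
--         "likes": "total_likes",
--         "comments_count": "total_comments",
--         "shares_count": "total_shares",
--     }
--     totals = {"total_likes": 0, "total_comments": 0, "total_shares": 0}
--     for post in posts:
--         for k, v in post.items():
--             if k in field:
--                 totals[field[k]] += v
--     totals["total_posts"] = len(posts)
--     return totals
-- ===== Notes on version B (the rewrite author's own statement) =====
-- stated objective: alternative
-- what changed: Instead of three per-field summing passes with dict lookups, B scans each post's items once and routes every value through a field-name mapping table into a running totals dict, which it then returns.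
import Mathlib
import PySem

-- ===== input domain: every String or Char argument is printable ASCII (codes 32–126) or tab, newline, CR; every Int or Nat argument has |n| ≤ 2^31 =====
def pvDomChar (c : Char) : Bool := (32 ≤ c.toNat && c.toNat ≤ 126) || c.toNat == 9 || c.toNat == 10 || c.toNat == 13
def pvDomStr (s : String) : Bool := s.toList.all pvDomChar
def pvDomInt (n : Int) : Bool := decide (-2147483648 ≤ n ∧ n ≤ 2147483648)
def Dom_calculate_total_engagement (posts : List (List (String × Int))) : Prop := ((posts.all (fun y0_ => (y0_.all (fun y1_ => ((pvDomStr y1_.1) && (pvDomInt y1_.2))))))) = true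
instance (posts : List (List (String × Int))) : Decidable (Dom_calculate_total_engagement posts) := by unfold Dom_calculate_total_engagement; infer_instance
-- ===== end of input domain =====

-- B replaces A's three per-field summing passes by a single scan over each post's items,
-- routed through a field-name mapping table into a running totals dict (objective: alternative).

-- ===== PORT A =====
-- post.get(k, 0) on the association-list encoding of a dict
def pvGet0 (post : List (String × Int)) (k : String) : Int :=
  ((PySem.Dict.mk post).get? k).getD 0

def calculate_total_engagement (posts : List (List (String × Int))) : List (String × Int) :=
  let total_likes := (posts.map (fun post => pvGet0 post "likes")).sum
  let total_comments := (posts.map (fun post => pvGet0 post "comments_count")).sum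
  let total_shares := (posts.map (fun post => pvGet0 post "shares_count")).sum
  [("total_likes", total_likes), ("total_comments", total_comments),
   ("total_shares", total_shares), ("total_posts", (posts.length : Int))]

-- ===== PORT B =====
-- the literal `field` routing table of Source B
def pvFieldMap : PySem.Dict String String :=
  PySem.Dict.mk [("likes", "total_likes"), ("comments_count", "total_comments"),
                 ("shares_count", "total_shares")]

-- the inner loop of Source B: `for k, v in post.items(): if k in field: totals[field[k]] += v`
-- (post.items() iterates the dict's pairs in insertion order = the association list itself)
def pvScanItems (t : PySem.Dict String Int) (post : List (String × Int)) : PySem.Dict String Int :=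
  post.foldl
    (fun t kv =>
      if pvFieldMap.contains kv.1 then
        t.modify ((pvFieldMap.get? kv.1).getD "") 0 (· + kv.2)
      else t) t

def calculate_total_engagement_alt (posts : List (List (String × Int))) : List (String × Int) :=
  let totals0 : PySem.Dict String Int :=
    PySem.Dict.mk [("total_likes", 0), ("total_comments", 0), ("total_shares", 0)]
  let totals := posts.foldl pvScanItems totals0
  (totals.insert "total_posts" (posts.length : Int)).items

-- ===== PRECONDITION & SPEC =====
-- Pre_ excludes association lists with duplicate keys inside a post: these do not represent any
-- Python dict (dicts have unique keys), so both programs' behaviour there is an encoding accident.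
def Pre_calculate_total_engagement (posts : List (List (String × Int))) : Prop :=
  ∀ post ∈ posts, (post.map Prod.fst).Nodup
instance (posts : List (List (String × Int))) : Decidable (Pre_calculate_total_engagement posts) := by unfold Pre_calculate_total_engagement; infer_instance

def pvWitness_calculate_total_engagement : (List (List (String × Int))) :=
  [[("likes", 3), ("comments_count", 1)], [("shares_count", 2), ("x", 7)]]

def Spec_calculate_total_engagement (posts : List (List (String × Int))) (out : List (String × Int)) : Prop := out = calculate_total_engagement_alt posts
instance (posts : List (List (String × Int))) (out : List (String × Int)) : Decidable (Spec_calculate_total_engagement posts out) := by unfold Spec_calculate_total_engagement; infer_instance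

-- ===== CLAIM (what is proved, stated in full; the proofs are below) =====
def Claim_equal_calculate_total_engagement : Prop := ∀ (posts : List (List (String × Int))), Dom_calculate_total_engagement posts → Pre_calculate_total_engagement posts → Spec_calculate_total_engagement posts (calculate_total_engagement posts)

-- ===== LEMMAS AND PROOFS =====

-- a key absent from the association list looks up to none
lemma get?_mk_of_not_mem (l : List (String × Int)) (k : String) (h : k ∉ l.map Prod.fst) :
    (PySem.Dict.mk l).get? k = none := by
  induction l with
  | nil => rfl
  | cons p rest ih =>
      rw [PySem.Dict.get?_mk_cons]
      simp only [List.map_cons, List.mem_cons, not_or] at h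
      have hne : (p.1 == k) = false := beq_eq_false_iff_ne.mpr (fun e => h.1 e.symm)
      rw [hne]
      simpa using ih h.2

-- one inner scan over a duplicate-free post adds exactly A's three per-field lookups
lemma scan_spec (post : List (String × Int)) (a b c : Int)
    (h : (post.map Prod.fst).Nodup) :
    pvScanItems (PySem.Dict.mk [("total_likes", a), ("total_comments", b), ("total_shares", c)]) post
      = PySem.Dict.mk [("total_likes", a + pvGet0 post "likes"),
                       ("total_comments", b + pvGet0 post "comments_count"),
                       ("total_shares", c + pvGet0 post "shares_count")] := by
  induction post generalizing a b c with
  | nil => simp [pvScanItems, pvGet0, PySem.Dict.get?]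
  | cons kv rest ih =>
      obtain ⟨k, v⟩ := kv
      simp only [List.map_cons, List.nodup_cons] at h
      obtain ⟨hk, hrest⟩ := h
      have hstep : ∀ t : PySem.Dict String Int,
          pvScanItems t ((k, v) :: rest)
            = pvScanItems (if pvFieldMap.contains k then
                t.modify ((pvFieldMap.get? k).getD "") 0 (· + v) else t) rest := by
        intro t; rfl
      rw [hstep]
      by_cases h1 : k = "likes"
      · subst h1
        have hz : ((PySem.Dict.mk rest).get? "likes").getD 0 = 0 := by
          rw [get?_mk_of_not_mem rest _ hk]; rfl
        rw [if_pos (by decide),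
            show ((pvFieldMap.get? "likes").getD "") = "total_likes" from rfl]
        have hmod : (PySem.Dict.mk [("total_likes", a), ("total_comments", b), ("total_shares", c)]).modify "total_likes" 0 (· + v)
            = PySem.Dict.mk [("total_likes", a + v), ("total_comments", b), ("total_shares", c)] := by
          simp [PySem.Dict.modify, PySem.Dict.insert, PySem.Dict.getD, PySem.Dict.get?, PySem.Dict.contains]
        rw [hmod, ih _ _ _ hrest]
        simp [pvGet0, PySem.Dict.get?_mk_cons, hz]
      by_cases h2 : k = "comments_count"
      · subst h2
        have hz : ((PySem.Dict.mk rest).get? "comments_count").getD 0 = 0 := by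
          rw [get?_mk_of_not_mem rest _ hk]; rfl
        rw [if_pos (by decide),
            show ((pvFieldMap.get? "comments_count").getD "") = "total_comments" from rfl]
        have hmod : (PySem.Dict.mk [("total_likes", a), ("total_comments", b), ("total_shares", c)]).modify "total_comments" 0 (· + v)
            = PySem.Dict.mk [("total_likes", a), ("total_comments", b + v), ("total_shares", c)] := by
          simp [PySem.Dict.modify, PySem.Dict.insert, PySem.Dict.getD, PySem.Dict.get?, PySem.Dict.contains]
        rw [hmod, ih _ _ _ hrest]
        simp [pvGet0, PySem.Dict.get?_mk_cons, hz]
      by_cases h3 : k = "shares_count"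
      · subst h3
        have hz : ((PySem.Dict.mk rest).get? "shares_count").getD 0 = 0 := by
          rw [get?_mk_of_not_mem rest _ hk]; rfl
        rw [if_pos (by decide),
            show ((pvFieldMap.get? "shares_count").getD "") = "total_shares" from rfl]
        have hmod : (PySem.Dict.mk [("total_likes", a), ("total_comments", b), ("total_shares", c)]).modify "total_shares" 0 (· + v)
            = PySem.Dict.mk [("total_likes", a), ("total_comments", b), ("total_shares", c + v)] := by
          simp [PySem.Dict.modify, PySem.Dict.insert, PySem.Dict.getD, PySem.Dict.get?, PySem.Dict.contains]
        rw [hmod, ih _ _ _ hrest]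
        simp [pvGet0, PySem.Dict.get?_mk_cons, hz]
      · have hc : pvFieldMap.contains k = false := by
          simp [pvFieldMap, PySem.Dict.contains]
          exact ⟨fun e => h1 e.symm, fun e => h2 e.symm, fun e => h3 e.symm⟩
        rw [hc]
        simp only [if_false, Bool.false_eq_true]
        rw [ih _ _ _ hrest]
        have e1 : pvGet0 ((k, v) :: rest) "likes" = pvGet0 rest "likes" := by
          simp [pvGet0, PySem.Dict.get?_mk_cons, h1]
        have e2 : pvGet0 ((k, v) :: rest) "comments_count" = pvGet0 rest "comments_count" := by
          simp [pvGet0, PySem.Dict.get?_mk_cons, h2]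
        have e3 : pvGet0 ((k, v) :: rest) "shares_count" = pvGet0 rest "shares_count" := by
          simp [pvGet0, PySem.Dict.get?_mk_cons, h3]
        rw [e1, e2, e3]

-- the outer fold accumulates the three map-sums
lemma fold_spec (posts : List (List (String × Int))) (a b c : Int)
    (h : ∀ post ∈ posts, (post.map Prod.fst).Nodup) :
    posts.foldl pvScanItems
      (PySem.Dict.mk [("total_likes", a), ("total_comments", b), ("total_shares", c)])
      = PySem.Dict.mk
          [("total_likes", a + (posts.map (fun post => pvGet0 post "likes")).sum),
           ("total_comments", b + (posts.map (fun post => pvGet0 post "comments_count")).sum),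
           ("total_shares", c + (posts.map (fun post => pvGet0 post "shares_count")).sum)] := by
  induction posts generalizing a b c with
  | nil => simp
  | cons p ps ih =>
      rw [List.foldl_cons, scan_spec p a b c (h p (by simp)),
          ih _ _ _ (fun q hq => h q (by simp [hq]))]
      simp [add_assoc]

-- ===== VERDICT (by name: the statement is the Claim_ definition above) =====
theorem calculate_total_engagement_spec : Claim_equal_calculate_total_engagement := by
  intro posts _ hpre
  show _ = _
  rw [calculate_total_engagement_alt]
  rw [fold_spec posts 0 0 0 hpre]
  simp [calculate_total_engagement, PySem.Dict.items_insert, PySem.Dict.contains]
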